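-- pv_equiv track=rewrite | github.com/huytq000605/GrindLC | Graph/Graph Connectivity With Threshold/solution.py | areConnected
-- ===== SOURCE A (Python) =====
-- from typing import List
--
-- class UF:
--     def __init__(self, n):
--         self.parents = [i for i in range(n)]
--         self.rank = [1 for i in range(n)]
--
--     def find(self, x):
--         if x != self.parents[x]:
--             self.parents[x] = self.find(self.parents[x])
--         return self.parents[x]
--
--     def union(self, x, y):
--         x, y = self.find(x), self.find(y)
--         if x == y:
--             return
--         if self.rank[x] < self.rank[y]:
--             x, y = y, x
--         self.parents[y] = x
--         self.rank[x] += self.rank[y]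
--
-- def areConnected(n: int, threshold: int, queries: List[List[int]]) -> List[bool]:
--     uf = UF(n + 1)
--     result = []
--     for i in range(threshold + 1, n + 1):
--         multiply = 2
--         while i * multiply <= n:
--             uf.union(i, i * multiply)
--             multiply += 1
--
--     for u, v in queries:
--         if uf.find(u) == uf.find(v):
--             result.append(True)
--         else:
--             result.append(False)
--
--     return result
-- ===== SOURCE B (Python) =====
-- def areConnected(n, threshold, queries):
--     size = n + 1
--     comp = list(range(size))
--     members = [[i] for i in range(size)]
--     for i in range(threshold + 1, n + 1):
--         for j in range(i + i, n + 1, i):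
--             a, b = comp[i], comp[j]
--             if a != b:
--                 if len(members[a]) < len(members[b]):
--                     a, b = b, a
--                 for x in members[b]:
--                     comp[x] = a
--                 members[a].extend(members[b])
--                 members[b] = []
--     return [comp[u] == comp[v] for u, v in queries]
-- ===== Notes on version B (the rewrite author's own statement) =====
-- stated objective: alternative
-- what changed: Replaces the union-find forest (recursive find with path compression, union by rank) with a flat component-id array maintained by small-to-large class relabeling (quick-find with member lists), so queries become plain array lookups with no tree walking.
import Mathlib
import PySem

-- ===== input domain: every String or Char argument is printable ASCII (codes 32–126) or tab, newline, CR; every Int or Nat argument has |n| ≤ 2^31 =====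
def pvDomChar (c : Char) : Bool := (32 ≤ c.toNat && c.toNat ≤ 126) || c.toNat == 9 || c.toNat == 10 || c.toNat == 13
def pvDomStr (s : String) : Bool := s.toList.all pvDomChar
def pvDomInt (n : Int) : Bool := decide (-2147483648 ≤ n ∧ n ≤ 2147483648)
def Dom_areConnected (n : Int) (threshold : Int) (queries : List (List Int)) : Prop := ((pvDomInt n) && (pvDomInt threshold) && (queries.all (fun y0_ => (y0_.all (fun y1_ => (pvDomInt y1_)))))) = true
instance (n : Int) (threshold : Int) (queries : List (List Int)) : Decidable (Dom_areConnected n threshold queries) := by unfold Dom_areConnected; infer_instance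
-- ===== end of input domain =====

-- B replaces A's union-find forest (recursive find + path compression + rank) by a flat
-- component-id array maintained with small-to-large member-list relabeling; same results, similar cost.


-- ===== PORT A =====
-- UF.find with path compression; fuel is a totality guard only (Python's recursion always
-- terminates on the forest; fuel = len(parents)+1 is proved sufficient below).
def findA : Nat → List Int → Int → Option (List Int × Int)
  | 0, _, _ => none
  | fuel+1, P, x =>
    match PySem.List.pyGet? P x with
    | none => none
    | some px =>
      if x ≠ px then
        match findA fuel P px with
        | none => none
        | some (P1, r) =>
          match PySem.List.pySet? P1 x r with
          | none => none
          | some P2 =>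
            match PySem.List.pyGet? P2 x with
            | none => none
            | some r2 => some (P2, r2)
      else some (P, px)

-- UF.union (reads rank after the swap, exactly as the Python does)
def unionA (fuel : Nat) (P R : List Int) (x y : Int) : Option (List Int × List Int) :=
  match findA fuel P x with
  | none => none
  | some (P1, rx) =>
    match findA fuel P1 y with
    | none => none
    | some (P2, ry) =>
      if rx = ry then some (P2, R)
      else
        match PySem.List.pyGet? R rx, PySem.List.pyGet? R ry with
        | some rkx, some rky =>
          let xy := if rkx < rky then (ry, rx) else (rx, ry)
          match PySem.List.pySet? P2 xy.2 xy.1 with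
          | none => none
          | some P3 =>
            match PySem.List.pyGet? R xy.1, PySem.List.pyGet? R xy.2 with
            | some a, some b =>
              match PySem.List.pySet? R xy.1 (a + b) with
              | none => none
              | some R' => some (P3, R')
            | _, _ => none
        | _, _ => none

-- the inner 'while i * multiply <= n' loop; fuel is a totality guard (the loop diverges in
-- Python exactly when i ≤ 0 reaches it, which Pre_ excludes)
def innerA (n : Int) : Nat → Int → Int → List Int × List Int → Option (List Int × List Int)
  | 0, _, _, _ => none
  | fuel+1, i, m, (P, R) =>
    if i * m ≤ n then
      match unionA (P.length + 1) P R i (i * m) with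
      | none => none
      | some st => innerA n fuel i (m + 1) st
    else some (P, R)

-- 'for u, v in queries: result.append(uf.find(u) == uf.find(v))' (find mutates parents)
def queryLoopA : List Int × List Int → List (List Int) → Option (List Bool)
  | _, [] => some []
  | (P, R), q :: rest =>
    match q with
    | [u, v] =>
      match findA (P.length + 1) P u with
      | none => none
      | some (P1, ru) =>
        match findA (P1.length + 1) P1 v with
        | none => none
        | some (P2, rv) =>
          match queryLoopA (P2, R) rest with
          | none => none
          | some bs => some ((ru == rv) :: bs)
    | _ => none

def areConnected (n : Int) (threshold : Int) (queries : List (List Int)) : List Bool :=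
  match (PySem.List.pyRange (threshold + 1) (n + 1) 1).foldl
      (fun ost i => ost.bind (fun st => innerA n ((n + 1).toNat + 1) i 2 st))
      (some (PySem.List.pyRange 0 (n + 1) 1, (PySem.List.pyRange 0 (n + 1) 1).map (fun _ => (1 : Int)))) with
  | none => []
  | some st => (queryLoopA st queries).getD []

-- ===== PORT B =====
-- 'for x in members[b]: comp[x] = a'
def relabelLoop : List Int → List Int → Int → Option (List Int)
  | comp, [], _ => some comp
  | comp, x :: rest, a =>
    match PySem.List.pySet? comp x a with
    | none => none
    | some c' => relabelLoop c' rest a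

-- merge the classes of i and j: relabel the smaller member list to the label of the larger
def linkB (comp : List Int) (members : List (List Int)) (i j : Int) : Option (List Int × List (List Int)) :=
  match PySem.List.pyGet? comp i, PySem.List.pyGet? comp j with
  | some a, some b =>
    if a ≠ b then
      match PySem.List.pyGet? members a, PySem.List.pyGet? members b with
      | some la, some lb =>
        let s := if la.length < lb.length then (b, a, lb, la) else (a, b, la, lb)
        match relabelLoop comp s.2.2.2 s.1 with
        | none => none
        | some comp' =>
          match PySem.List.pySet? members s.1 (s.2.2.1 ++ s.2.2.2) with
          | none => none
          | some m1 =>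
            match PySem.List.pySet? m1 s.2.1 [] with
            | none => none
            | some m2 => some (comp', m2)
      | _, _ => none
    else some (comp, members)
  | _, _ => none

-- '[comp[u] == comp[v] for u, v in queries]'
def queriesB (comp : List Int) : List (List Int) → Option (List Bool)
  | [] => some []
  | q :: rest =>
    match q with
    | [u, v] =>
      match PySem.List.pyGet? comp u, PySem.List.pyGet? comp v with
      | some cu, some cv => (queriesB comp rest).map (fun bs => (cu == cv) :: bs)
      | _, _ => none
    | _ => none

def areConnected_alt (n : Int) (threshold : Int) (queries : List (List Int)) : List Bool :=
  match (PySem.List.pyRange (threshold + 1) (n + 1) 1).foldl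
      (fun os i => (PySem.List.pyRange (i + i) (n + 1) i).foldl
        (fun os2 j => os2.bind (fun cm => linkB cm.1 cm.2 i j)) os)
      (some (PySem.List.pyRange 0 (n + 1) 1, (PySem.List.pyRange 0 (n + 1) 1).map (fun i => [i]))) with
  | none => []
  | some cm => (queriesB cm.1 queries).getD []

-- ===== PRECONDITION & SPEC =====
-- Pre_ is exactly the set of inputs on which the Python A returns: threshold < 0 together with
-- threshold < n makes A's inner while-loop run forever (i*multiply never exceeds n once i ≤ 0 is
-- reached), a query entry of length ≠ 2 raises ValueError on unpacking, and a query endpoint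
-- outside [-(n+1), n] raises IndexError in find.  Negative endpoints (Python's negative-index
-- wraparound) are INSIDE Pre_ and matched by B.
def Pre_areConnected (n : Int) (threshold : Int) (queries : List (List Int)) : Prop :=
  (0 ≤ threshold ∨ n ≤ threshold) ∧
    ∀ q ∈ queries, q.length = 2 ∧ ∀ x ∈ q, -(n + 1) ≤ x ∧ x ≤ n
instance (n : Int) (threshold : Int) (queries : List (List Int)) : Decidable (Pre_areConnected n threshold queries) := by
  unfold Pre_areConnected; infer_instance

def pvWitness_areConnected : Int × Int × List (List Int) := (6, 1, [[1, 2], [2, 4], [3, 6]])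

def Spec_areConnected (n : Int) (threshold : Int) (queries : List (List Int)) (out : List Bool) : Prop := out = areConnected_alt n threshold queries
instance (n : Int) (threshold : Int) (queries : List (List Int)) (out : List Bool) : Decidable (Spec_areConnected n threshold queries out) := by unfold Spec_areConnected; infer_instance

-- ===== CLAIM (what is proved, stated in full; the proofs are below) =====
def Claim_equal_areConnected : Prop := ∀ (n : Int) (threshold : Int) (queries : List (List Int)), Dom_areConnected n threshold queries → Pre_areConnected n threshold queries → Spec_areConnected n threshold queries (areConnected n threshold queries)

-- ===== LEMMAS AND PROOFS =====

-- ---- index notation over the valid range ----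
def nthD (P : List Int) (x : Int) : Int := PySem.List.pyGetD P x 0
def mthD (ms : List (List Int)) (c : Int) : List Int := PySem.List.pyGetD ms c []
def ValidI (N x : Int) : Prop := 0 ≤ x ∧ x < N
def ixN (N x : Int) : Int := if x < 0 then x + N else x
def classCard (N : Int) (root : Int → Int) (c : Int) : Nat :=
  ((PySem.List.pyRange 0 N 1).filter (fun y => root y == c)).length

-- ---- invariants ----
structure InvA (N : Int) (P : List Int) (root : Int → Int) (d : Int → Nat) : Prop where
  len : P.length = N.toNat
  pnt : ∀ x, ValidI N x → ValidI N (nthD P x)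
  rv : ∀ x, ValidI N x → ValidI N (root x)
  ra : ∀ x, ValidI N x → nthD P (root x) = root x
  rb : ∀ x, ValidI N x → root (nthD P x) = root x
  rc : ∀ x, ValidI N x → nthD P x = x → root x = x
  rd : ∀ x, ValidI N x → nthD P x ≠ x → d (nthD P x) < d x
  re : ∀ x, ValidI N x → root x ≠ x → d (root x) < d x
  rh : ∀ x, ValidI N x → d x < classCard N root (root x)

structure InvB (N : Int) (comp : List Int) (members : List (List Int)) : Prop where
  lenC : comp.length = N.toNat
  lenM : members.length = N.toNat
  cv : ∀ x, ValidI N x → ValidI N (nthD comp x)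
  mem : ∀ c, ValidI N c → ∀ x, x ∈ mthD members c ↔ (ValidI N x ∧ nthD comp x = c)

def BridgeAB (N : Int) (root : Int → Int) (comp : List Int) : Prop :=
  ∀ x y, ValidI N x → ValidI N y → (root x = root y ↔ nthD comp x = nthD comp y)

def JInv (N : Int) (st : List Int × List Int) (cm : List Int × List (List Int)) : Prop :=
  ∃ root d, InvA N st.1 root d ∧ st.2.length = N.toNat ∧ InvB N cm.1 cm.2 ∧ BridgeAB N root cm.1

lemma InvA.rr {N P root d} (h : InvA N P root d) {x : Int} (hx : ValidI N x) :
    root (root x) = root x := h.rc _ (h.rv _ hx) (h.ra _ hx)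

-- ---- generic indexing helpers ----
lemma get_valid {α : Type} (P : List α) {N x : Int} (d : α)
    (h : P.length = N.toNat) (hx : ValidI N x) :
    PySem.List.pyGet? P x = some (PySem.List.pyGetD P x d) := by
  have h1 : x < (P.length : Int) := by unfold ValidI at hx; omega
  rw [PySem.List.pyGet?_eq_some_getElem P hx.1 h1, PySem.List.pyGetD_eq_getElem P d hx.1 h1]

lemma set_valid {α : Type} (P : List α) {N x : Int} (v : α)
    (h : P.length = N.toNat) (hx : ValidI N x) :
    PySem.List.pySet? P x v = some (PySem.List.pySetD P x v) := by
  have h1 : x < (P.length : Int) := by unfold ValidI at hx; omega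
  rw [PySem.List.pySetD_of_nonneg P v hx.1]
  simp [PySem.List.pySet?, PySem.List.pyIdx?, hx.1, h1]

lemma nth_setD {α : Type} (P : List α) {i : Int} (j : Int) (v dflt : α)
    (hi0 : 0 ≤ i) (hi : i < (P.length : Int)) (hj : 0 ≤ j) :
    PySem.List.pyGetD (PySem.List.pySetD P i v) j dflt
      = if j = i then v else PySem.List.pyGetD P j dflt := by
  rw [PySem.List.pySetD_of_nonneg P v hi0]
  have key := PySem.List.pyGetD_pySetD_natCast P i.toNat j.toNat v dflt (by omega)
  rw [PySem.List.pySetD_of_nonneg P v (by positivity : (0:Int) ≤ (i.toNat:Int))] at key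
  simp only [Int.toNat_of_nonneg hi0, Int.toNat_of_nonneg hj] at key
  rw [key]
  congr 1
  simp only [eq_iff_iff]
  omega

lemma ix_valid {N x : Int} (h1 : -N ≤ x) (h2 : x < N) : ValidI N (ixN N x) := by
  unfold ixN ValidI; split <;> omega

lemma get_ix {α : Type} (P : List α) {N x : Int} (d : α)
    (h : P.length = N.toNat) (h1 : -N ≤ x) (h2 : x < N) :
    PySem.List.pyGet? P x = some (PySem.List.pyGetD P (ixN N x) d) := by
  unfold ixN
  split
  · next hneg =>
    have hk : x = -((-x).toNat : Int) := by omega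
    rw [hk, PySem.List.pyGet?_neg_natCast P (-x).toNat (by omega) (by omega)]
    rw [PySem.List.pyGetD_eq_getElem P d (by omega) (by omega)]
    rw [List.getElem?_eq_getElem (by omega)]
    congr 1
    congr 1
    omega
  · next hpos =>
    rw [PySem.List.pyGet?_eq_some_getElem P (by omega) (by omega),
        PySem.List.pyGetD_eq_getElem P d (by omega) (by omega)]

lemma set_ix {α : Type} (P : List α) {N x : Int} (v : α)
    (h : P.length = N.toNat) (h1 : -N ≤ x) (h2 : x < N) :
    PySem.List.pySet? P x v = some (PySem.List.pySetD P (ixN N x) v) := by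
  unfold ixN
  by_cases hneg : x < 0
  · rw [if_pos hneg, PySem.List.pySetD_of_nonneg P v (by omega)]
    simp only [PySem.List.pySet?, PySem.List.pyIdx?]
    rw [if_neg (by omega), if_pos (by omega)]
    simp only [Option.map_some]
    congr 2
    omega
  · rw [if_neg hneg, PySem.List.pySetD_of_nonneg P v (by omega)]
    simp only [PySem.List.pySet?, PySem.List.pyIdx?]
    rw [if_pos (by omega), if_pos (by omega)]
    simp

lemma classCard_le (N : Int) (root : Int → Int) (c : Int) : classCard N root c ≤ N.toNat := by
  unfold classCard
  calc ((PySem.List.pyRange 0 N 1).filter (fun y => root y == c)).length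
      ≤ (PySem.List.pyRange 0 N 1).length := List.length_filter_le _ _
    _ = N.toNat := by rw [PySem.List.length_pyRange_one]; omega

lemma classCard_pos {N : Int} (root : Int → Int) {c : Int} (hc : ValidI N c) (hfix : root c = c) :
    0 < classCard N root c := by
  unfold classCard
  rw [List.length_pos_iff]
  intro hnil
  have hmem : c ∈ (PySem.List.pyRange 0 N 1).filter (fun y => root y == c) := by
    rw [List.mem_filter]
    exact ⟨(PySem.List.mem_pyRange_one).2 (by unfold ValidI at hc; omega), by simp [hfix]⟩
  rw [hnil] at hmem; simp at hmem

-- path compression: redirecting a valid x straight to its root preserves the invariant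
lemma invA_point_to_root {N : Int} {P : List Int} {root : Int → Int} {d : Int → Nat} {x : Int}
    (hA : InvA N P root d) (hx : ValidI N x) :
    InvA N (PySem.List.pySetD P x (root x)) root d := by
  have hxl : x < (P.length : Int) := by
    have h2 := hx.2; have hl := hA.len; omega
  have hnth : ∀ z, ValidI N z →
      nthD (PySem.List.pySetD P x (root x)) z = if z = x then root x else nthD P z := by
    intro z hz; unfold nthD; rw [nth_setD P z _ 0 hx.1 hxl hz.1]
  refine ⟨by rw [PySem.List.length_pySetD]; exact hA.len, ?_, hA.rv, ?_, ?_, ?_, ?_, hA.re, hA.rh⟩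
  · intro z hz; rw [hnth z hz]
    by_cases h : z = x
    · rw [if_pos h]; exact hA.rv x hx
    · rw [if_neg h]; exact hA.pnt z hz
  · intro z hz; rw [hnth (root z) (hA.rv z hz)]
    by_cases h : root z = x
    · rw [if_pos h, ← h, hA.rr hz]
    · rw [if_neg h]; exact hA.ra z hz
  · intro z hz; rw [hnth z hz]
    by_cases h : z = x
    · rw [if_pos h, hA.rr hx, h]
    · rw [if_neg h]; exact hA.rb z hz
  · intro z hz hne; rw [hnth z hz] at hne
    by_cases h : z = x
    · rw [if_pos h] at hne; subst h; exact hne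
    · rw [if_neg h] at hne; exact hA.rc z hz hne
  · intro z hz hne; rw [hnth z hz] at hne ⊢
    by_cases h : z = x
    · rw [if_pos h] at hne ⊢; subst h; exact hA.re z hz (fun he => hne (he))
    · rw [if_neg h] at hne ⊢; exact hA.rd z hz hne

-- A's find: returns the root, compresses paths, and preserves the invariant with the SAME
-- root and depth functions.
lemma find_ok {N : Int} {root : Int → Int} {d : Int → Nat} :
    ∀ (fuel : Nat) (P : List Int) (x : Int), InvA N P root d → ValidI N x → d x < fuel →
      ∃ P', findA fuel P x = some (P', root x) ∧ InvA N P' root d := by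
  intro fuel
  induction fuel with
  | zero => intro P x _ _ h; exact absurd h (by omega)
  | succ f ih =>
    intro P x hA hx hfu
    simp only [findA]
    rw [get_valid P 0 hA.len hx]
    dsimp only
    by_cases hxe : x = nthD P x
    · rw [if_neg (by unfold nthD at hxe; omega)]
      rw [hA.rc x hx hxe.symm]
      exact ⟨P, by rw [show PySem.List.pyGetD P x 0 = x from hxe.symm], hA⟩
    · have hne : x ≠ PySem.List.pyGetD P x 0 := hxe
      rw [if_pos hne]
      have hpxv := hA.pnt x hx
      have hdpx : d (nthD P x) < f := by
        have h1 := hA.rd x hx (fun hh => hxe hh.symm)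
        omega
      obtain ⟨P1, hrec, hA1⟩ := ih P (nthD P x) hA hpxv hdpx
      have hrbx : root (nthD P x) = root x := hA.rb x hx
      rw [show PySem.List.pyGetD P x 0 = nthD P x from rfl, hrec, hrbx]
      dsimp only
      rw [set_valid P1 (root x) hA1.len hx]
      dsimp only
      have hA2 := invA_point_to_root hA1 hx
      have hlen2 : (PySem.List.pySetD P1 x (root x)).length = N.toNat := by
        rw [PySem.List.length_pySetD]; exact hA1.len
      rw [get_valid _ 0 hlen2 hx]
      dsimp only
      have hval : PySem.List.pyGetD (PySem.List.pySetD P1 x (root x)) x 0 = root x := by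
        rw [nth_setD P1 x (root x) 0 hx.1 (by have := hx.2; have := hA1.len; omega) hx.1]
        rw [if_pos rfl]
      rw [hval]
      exact ⟨_, rfl, hA2⟩

lemma d_lt_len {N : Int} {P : List Int} {root : Int → Int} {d : Int → Nat} {x : Int}
    (hA : InvA N P root d) (hx : ValidI N x) : d x < P.length := by
  have h1 := hA.rh x hx
  have h2 := classCard_le N root (root x)
  have h3 := hA.len
  omega

-- find with the fuel the port passes, on any in-range (possibly negative) index
lemma find_full {N : Int} {P : List Int} {root : Int → Int} {d : Int → Nat} {x : Int}
    (hA : InvA N P root d) (h1 : -N ≤ x) (h2 : x < N) :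
    ∃ P', findA (P.length + 1) P x = some (P', root (ixN N x)) ∧ InvA N P' root d := by
  have hyv : ValidI N (ixN N x) := ix_valid h1 h2
  by_cases hneg : x < 0
  · -- the index wraps: one unfolding, then find_ok on the (nonnegative) parent
    have hN0 : 0 < N := by unfold ValidI at hyv; omega
    simp only [findA]
    rw [get_ix P 0 hA.len h1 h2]
    dsimp only
    have hpv : ValidI N (nthD P (ixN N x)) := hA.pnt _ hyv
    have hne : x ≠ PySem.List.pyGetD P (ixN N x) 0 := by
      have := hpv.1; unfold nthD at this; omega
    rw [if_pos hne]
    obtain ⟨P1, hrec, hA1⟩ := find_ok P.length P (nthD P (ixN N x)) hA hpv (d_lt_len hA hpv)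
    rw [show PySem.List.pyGetD P (ixN N x) 0 = nthD P (ixN N x) from rfl, hrec,
        hA.rb _ hyv]
    dsimp only
    rw [set_ix P1 (root (ixN N x)) hA1.len h1 h2]
    dsimp only
    have hA2 := invA_point_to_root hA1 hyv
    have hlen2 : (PySem.List.pySetD P1 (ixN N x) (root (ixN N x))).length = N.toNat := by
      rw [PySem.List.length_pySetD]; exact hA1.len
    rw [get_ix _ 0 hlen2 h1 h2]
    dsimp only
    have hval : PySem.List.pyGetD (PySem.List.pySetD P1 (ixN N x) (root (ixN N x))) (ixN N x) 0
        = root (ixN N x) := by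
      rw [nth_setD P1 (ixN N x) _ 0 hyv.1 (by have := hyv.2; have := hA1.len; omega) hyv.1]
      rw [if_pos rfl]
    rw [hval]
    exact ⟨_, rfl, hA2⟩
  · have hxx : ixN N x = x := by unfold ixN; rw [if_neg hneg]
    rw [hxx]
    exact find_ok (P.length + 1) P x hA ⟨by omega, h2⟩ (by have := d_lt_len hA (⟨by omega, h2⟩ : ValidI N x); omega)

-- the shape of the merged partition (same on both sides)
def MergeRel (N : Int) (root root' : Int → Int) (x y : Int) : Prop :=
  ∀ z w, ValidI N z → ValidI N w →
    (root' z = root' w ↔ root z = root w ∨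
      ((root z = root x ∨ root z = root y) ∧ (root w = root x ∨ root w = root y)))

lemma filter_or_disjoint {l : List Int} {p q : Int → Bool} (h : ∀ a ∈ l, ¬(p a = true ∧ q a = true)) :
    (l.filter (fun a => p a || q a)).length = (l.filter p).length + (l.filter q).length := by
  induction l with
  | nil => simp
  | cons a t ih =>
    have ht : ∀ b ∈ t, ¬(p b = true ∧ q b = true) := fun b hb => h b (List.mem_cons_of_mem a hb)
    have ha := h a (List.mem_cons_self)
    simp only [List.filter_cons]
    cases hp : p a <;> cases hq : q a <;> simp_all <;> omega

lemma classCard_congr {N : Int} {root1 root2 : Int → Int} {c1 c2 : Int}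
    (h : ∀ y, ValidI N y → (root1 y = c1 ↔ root2 y = c2)) :
    classCard N root1 c1 = classCard N root2 c2 := by
  unfold classCard
  congr 1
  apply List.filter_congr
  intro y hy
  have hv : ValidI N y := by
    rw [PySem.List.mem_pyRange_one] at hy; exact ⟨hy.1, hy.2⟩
  rw [Bool.eq_iff_iff]
  simp only [beq_iff_eq]
  exact h y hv

-- linking root L under root W: the new root and depth functions
lemma invA_link {N : Int} {P : List Int} {root : Int → Int} {d : Int → Nat} {W L : Int}
    (hA : InvA N P root d) (hWv : ValidI N W) (hLv : ValidI N L)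
    (hW : root W = W) (hL : root L = L) (hne : W ≠ L) :
    InvA N (PySem.List.pySetD P L W)
      (fun z => if root z = L then W else root z)
      (fun z => if root z = L then d z + d W + 1 else d z) := by
  have hLl : L < (P.length : Int) := by have := hLv.2; have := hA.len; omega
  have hnth : ∀ z, ValidI N z →
      nthD (PySem.List.pySetD P L W) z = if z = L then W else nthD P z := by
    intro z hz; unfold nthD; rw [nth_setD P z _ 0 hLv.1 hLl hz.1]
  have hccW : classCard N (fun z => if root z = L then W else root z) W
      = classCard N root L + classCard N root W := by
    unfold classCard
    have e1 : ((PySem.List.pyRange 0 N 1).filter (fun y => (if root y = L then W else root y) == W)).length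
        = ((PySem.List.pyRange 0 N 1).filter (fun y => (root y == L) || (root y == W))).length := by
      congr 1
      apply List.filter_congr
      intro y _
      by_cases hy : root y = L <;> simp [hy]
    rw [e1, filter_or_disjoint]
    intro a _
    simp only [beq_iff_eq]
    intro ⟨h1, h2⟩
    exact hne (h2.symm.trans h1)
  have hccO : ∀ c, c ≠ W → c ≠ L →
      classCard N (fun z => if root z = L then W else root z) c = classCard N root c := by
    intro c hcW hcL
    apply classCard_congr
    intro y _
    by_cases hy : root y = L
    · rw [if_pos hy]
      constructor
      · intro h; exact absurd h.symm hcW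
      · intro h; exact absurd (hy ▸ h : L = c).symm hcL
    · rw [if_neg hy]
  refine ⟨by rw [PySem.List.length_pySetD]; exact hA.len, ?_, ?_, ?_, ?_, ?_, ?_, ?_, ?_⟩
  · intro z hz; rw [hnth z hz]
    by_cases h : z = L
    · rw [if_pos h]; exact hWv
    · rw [if_neg h]; exact hA.pnt z hz
  · intro z hz
    by_cases h : root z = L
    · simp only [if_pos h]; exact hWv
    · simp only [if_neg h]; exact hA.rv z hz
  · intro z hz
    by_cases h : root z = L
    · simp only [if_pos h]
      rw [hnth W hWv, if_neg hne, show nthD P W = W from hW ▸ hA.ra W hWv]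
    · simp only [if_neg h]
      rw [hnth (root z) (hA.rv z hz), if_neg (by intro he; exact h (he ▸ rfl))]
      rw [show nthD P (root z) = root z from hA.ra z hz]
  · intro z hz
    by_cases h : z = L
    · subst h
      rw [hnth z hz, if_pos rfl]
      simp [hW, hL, hne]
    · rw [hnth z hz, if_neg h]
      have hre := hA.rb z hz
      simp only [hre]
  · intro z hz hzz
    rw [hnth z hz] at hzz
    by_cases h : z = L
    · rw [if_pos h] at hzz; exact absurd (hzz ▸ h) hne
    · rw [if_neg h] at hzz
      have := hA.rc z hz hzz
      rw [if_neg (by rw [this]; exact h), this]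
  · intro z hz hzz
    rw [hnth z hz] at hzz
    by_cases h : z = L
    · rw [if_pos h] at hzz
      subst h
      rw [hnth z hz, if_pos rfl]
      simp [hW, hL, hne]
    · rw [if_neg h] at hzz
      have hd := hA.rd z hz hzz
      have hre := hA.rb z hz
      rw [hnth z hz, if_neg h]
      simp only [hre]
      by_cases hb : root z = L <;> simp [hb] <;> omega
  · intro z hz hzz
    by_cases h : root z = L
    · simp only [if_pos h] at hzz ⊢
      simp only [hW, if_neg hne]
      omega
    · simp only [if_neg h] at hzz ⊢
      have := hA.re z hz hzz
      have hrr : root (root z) = root z := hA.rr hz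
      simp only [hrr, if_neg h]
      omega
  · intro z hz
    by_cases h : root z = L
    · simp only [if_pos h]
      rw [hccW]
      have h1 : d z < classCard N root L := h ▸ hA.rh z hz
      have h2 : d W < classCard N root W := by have := hA.rh W hWv; rwa [hW] at this
      omega
    · simp only [if_neg h]
      by_cases hzw : root z = W
      · rw [hzw, hccW]
        have h2 : d z < classCard N root W := hzw ▸ hA.rh z hz
        omega
      · rw [hccO (root z) hzw h]
        exact hA.rh z hz

lemma mergeRel_same {N : Int} {root : Int → Int} {x y : Int} (hxy : root x = root y) :
    MergeRel N root root x y := by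
  intro z w _ _
  constructor
  · exact Or.inl
  · intro h
    rcases h with h | ⟨h1, h2⟩
    · exact h
    · rcases h1 with h1 | h1 <;> rcases h2 with h2 | h2 <;> simp [h1, h2, hxy]

-- the shape of equality of relabeled values (used on both sides)
lemma swap_iff (u v p q : Int) :
    ((if p = v then u else p) = (if q = v then u else q)) ↔
      (p = q ∨ ((p = u ∨ p = v) ∧ (q = u ∨ q = v))) := by
  by_cases hp : p = v <;> by_cases hq : q = v
  · simp [hp, hq]
  · simp only [if_pos hp, if_neg hq]
    constructor
    · intro h; exact Or.inr ⟨Or.inr hp, Or.inl h.symm⟩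
    · intro h
      rcases h with h | ⟨_, h2⟩
      · exact absurd (h ▸ hp) hq
      · rcases h2 with h2 | h2
        · exact h2.symm
        · exact absurd h2 hq
  · simp only [if_neg hp, if_pos hq]
    constructor
    · intro h; exact Or.inr ⟨Or.inl h, Or.inr hq⟩
    · intro h
      rcases h with h | ⟨h1, _⟩
      · exact absurd (h ▸ hq) hp
      · rcases h1 with h1 | h1
        · exact h1
        · exact absurd h1 hp
  · simp only [if_neg hp, if_neg hq]
    constructor
    · exact Or.inl
    · intro h
      rcases h with h | ⟨h1, h2⟩
      · exact h
      · rcases h1 with h1 | h1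
        · rcases h2 with h2 | h2
          · rw [h1, h2]
          · exact absurd h2 hq
        · exact absurd h1 hp

lemma mergeRel_link {N : Int} {root : Int → Int} {x y W L : Int}
    (hWL : (W = root x ∧ L = root y) ∨ (W = root y ∧ L = root x)) :
    MergeRel N root (fun z => if root z = L then W else root z) x y := by
  intro z w _ _
  rw [swap_iff W L (root z) (root w)]
  rcases hWL with ⟨h1, h2⟩ | ⟨h1, h2⟩ <;> rw [← h1, ← h2] <;> tauto

lemma union_ok {N : Int} {P R : List Int} {root : Int → Int} {d : Int → Nat} {x y : Int}
    (hA : InvA N P root d) (hR : R.length = N.toNat) (hx : ValidI N x) (hy : ValidI N y) :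
    ∃ P' R' root' d', unionA (P.length + 1) P R x y = some (P', R') ∧
      InvA N P' root' d' ∧ R'.length = N.toNat ∧ MergeRel N root root' x y := by
  obtain ⟨P1, hf1, hA1⟩ := find_ok (P.length + 1) P x hA hx (by have := d_lt_len hA hx; omega)
  have hlen1 : P1.length = P.length := by rw [hA1.len, hA.len]
  obtain ⟨P2, hf2, hA2⟩ := find_ok (P.length + 1) P1 y hA1 hy
    (by have := d_lt_len hA1 hy; omega)
  unfold unionA
  rw [hf1]
  dsimp only
  rw [hf2]
  dsimp only
  by_cases hxy : root x = root y
  · rw [if_pos hxy]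
    exact ⟨P2, R, root, d, rfl, hA2, hR, mergeRel_same hxy⟩
  · rw [if_neg hxy]
    have hrxv := hA.rv x hx
    have hryv := hA.rv y hy
    rw [get_valid R 0 hR hrxv, get_valid R 0 hR hryv]
    dsimp only
    have hrrx : root (root x) = root x := hA.rr hx
    have hrry : root (root y) = root y := hA.rr hy
    by_cases hrk : PySem.List.pyGetD R (root x) 0 < PySem.List.pyGetD R (root y) 0
    · rw [if_pos hrk]
      dsimp only
      rw [set_valid P2 (root y) hA2.len hrxv]
      dsimp only
      rw [get_valid R 0 hR hryv, get_valid R 0 hR hrxv]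
      dsimp only
      rw [set_valid R _ hR hryv]
      refine ⟨_, _, _, _, rfl,
        invA_link hA2 hryv hrxv hrry hrrx (Ne.symm hxy), ?_, ?_⟩
      · rw [PySem.List.length_pySetD]; exact hR
      · exact mergeRel_link (Or.inr ⟨rfl, rfl⟩)
    · rw [if_neg hrk]
      dsimp only
      rw [set_valid P2 (root x) hA2.len hryv]
      dsimp only
      rw [get_valid R 0 hR hrxv, get_valid R 0 hR hryv]
      dsimp only
      rw [set_valid R _ hR hrxv]
      refine ⟨_, _, _, _, rfl,
        invA_link hA2 hrxv hryv hrrx hrry hxy, ?_, ?_⟩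
      · rw [PySem.List.length_pySetD]; exact hR
      · exact mergeRel_link (Or.inl ⟨rfl, rfl⟩)


lemma relabel_ok {N : Int} :
    ∀ (S : List Int) (comp : List Int), comp.length = N.toNat → ∀ (a : Int), (∀ x ∈ S, ValidI N x) →
    ∃ comp', relabelLoop comp S a = some comp' ∧ comp'.length = N.toNat ∧
      ∀ z, ValidI N z → nthD comp' z = if z ∈ S then a else nthD comp z := by
  intro S
  induction S with
  | nil =>
    intro comp hlen a _
    exact ⟨comp, rfl, hlen, by intro z _; simp⟩
  | cons x rest ih =>
    intro comp hlen a hS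
    have hxv : ValidI N x := hS x List.mem_cons_self
    simp only [relabelLoop]
    rw [set_valid comp a hlen hxv]
    obtain ⟨comp', heq, hlen', hpt⟩ := ih (PySem.List.pySetD comp x a)
      (by rw [PySem.List.length_pySetD]; exact hlen) a
      (fun z hz => hS z (List.mem_cons_of_mem x hz))
    refine ⟨comp', heq, hlen', ?_⟩
    intro z hz
    rw [hpt z hz]
    have hset : nthD (PySem.List.pySetD comp x a) z = if z = x then a else nthD comp z := by
      unfold nthD
      rw [nth_setD comp z _ 0 hxv.1 (by have := hxv.2; omega) hz.1]
    by_cases h1 : z ∈ rest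
    · rw [if_pos h1, if_pos (by simp [h1])]
    · by_cases h2 : z = x
      · rw [if_neg h1, hset, if_pos h2, if_pos (by simp [h2])]
      · rw [if_neg h1, hset, if_neg h2, if_neg (by simp [h1, h2])]

-- the common tail of linkB after the size-based swap has been decided
lemma link_core {N : Int} {comp : List Int} {members : List (List Int)} {a' b' : Int}
    (hB : InvB N comp members) (ha : ValidI N a') (hb : ValidI N b') (hne : a' ≠ b') :
    ∃ comp' m2,
      (match relabelLoop comp (mthD members b') a' with
       | none => none
       | some comp' =>
         match PySem.List.pySet? members a' (mthD members a' ++ mthD members b') with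
         | none => none
         | some m1 =>
           match PySem.List.pySet? m1 b' ([] : List Int) with
           | none => none
           | some m2 => some (comp', m2)) = some (comp', m2) ∧
      InvB N comp' m2 ∧
      (∀ z, ValidI N z → nthD comp' z = if nthD comp z = b' then a' else nthD comp z) := by
  have hSm : ∀ x ∈ mthD members b', ValidI N x := by
    intro x hx
    exact ((hB.mem b' hb x).1 hx).1
  obtain ⟨comp', heq, hlen', hpt⟩ := relabel_ok (mthD members b') comp hB.lenC a' hSm
  have hpt' : ∀ z, ValidI N z → nthD comp' z = if nthD comp z = b' then a' else nthD comp z := by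
    intro z hz
    rw [hpt z hz]
    by_cases h : nthD comp z = b'
    · rw [if_pos ((hB.mem b' hb z).2 ⟨hz, h⟩), if_pos h]
    · rw [if_neg (fun hmem => h ((hB.mem b' hb z).1 hmem).2), if_neg h]
  rw [heq]
  dsimp only
  rw [set_valid members _ hB.lenM ha]
  dsimp only
  have hlenm1 : (PySem.List.pySetD members a' (mthD members a' ++ mthD members b')).length = N.toNat := by
    rw [PySem.List.length_pySetD]; exact hB.lenM
  rw [set_valid _ _ hlenm1 hb]
  dsimp only
  have hmth : ∀ c, ValidI N c →
      mthD (PySem.List.pySetD (PySem.List.pySetD members a' (mthD members a' ++ mthD members b')) b' []) c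
        = if c = b' then [] else if c = a' then mthD members a' ++ mthD members b' else mthD members c := by
    intro c hc
    unfold mthD
    rw [nth_setD _ c _ [] hb.1 (by have := hb.2; have := hB.lenM; rw [PySem.List.length_pySetD]; omega) hc.1]
    rw [nth_setD _ c _ [] ha.1 (by have := ha.2; have := hB.lenM; omega) hc.1]
  refine ⟨comp', _, rfl, ⟨hlen', by rw [PySem.List.length_pySetD, PySem.List.length_pySetD]; exact hB.lenM, ?_, ?_⟩, hpt'⟩
  · intro z hz
    rw [hpt' z hz]
    by_cases h : nthD comp z = b'
    · rw [if_pos h]; exact ha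
    · rw [if_neg h]; exact hB.cv z hz
  · intro c hc x
    rw [hmth c hc]
    by_cases hcb : c = b'
    · subst hcb
      rw [if_pos rfl]
      simp only [List.not_mem_nil, false_iff]
      intro ⟨hxv, hcx⟩
      rw [hpt' x hxv] at hcx
      by_cases h : nthD comp x = c
      · rw [if_pos h] at hcx; exact hne hcx
      · rw [if_neg h] at hcx; exact h hcx
    · rw [if_neg hcb]
      by_cases hca : c = a'
      · subst hca
        rw [if_pos rfl, List.mem_append]
        constructor
        · intro h
          rcases h with h | h
          · have := (hB.mem c ha x).1 h
            refine ⟨this.1, ?_⟩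
            rw [hpt' x this.1, this.2, if_neg hne]
          · have := (hB.mem b' hb x).1 h
            refine ⟨this.1, ?_⟩
            rw [hpt' x this.1, this.2, if_pos rfl]
        · intro ⟨hxv, hcx⟩
          rw [hpt' x hxv] at hcx
          by_cases h : nthD comp x = b'
          · exact Or.inr ((hB.mem b' hb x).2 ⟨hxv, h⟩)
          · rw [if_neg h] at hcx
            exact Or.inl ((hB.mem c ha x).2 ⟨hxv, hcx⟩)
      · rw [if_neg hca]
        rw [hB.mem c hc x]
        constructor
        · intro ⟨hxv, hcx⟩
          refine ⟨hxv, ?_⟩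
          rw [hpt' x hxv, if_neg (fun h => hcb (hcx.symm.trans h))]
          exact hcx
        · intro ⟨hxv, hcx⟩
          refine ⟨hxv, ?_⟩
          rw [hpt' x hxv] at hcx
          by_cases h : nthD comp x = b'
          · rw [if_pos h] at hcx; exact absurd hcx.symm hca
          · rw [if_neg h] at hcx; exact hcx

-- one edge (i, j): A's union and B's link succeed together and re-establish the joint invariant
lemma step_ok {N : Int} {P R comp : List Int} {members : List (List Int)}
    {root : Int → Int} {d : Int → Nat} {i j : Int}
    (hA : InvA N P root d) (hR : R.length = N.toNat)
    (hB : InvB N comp members) (hBr : BridgeAB N root comp)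
    (hi : ValidI N i) (hj : ValidI N j) :
    ∃ P' R' comp' members', unionA (P.length + 1) P R i j = some (P', R') ∧
      linkB comp members i j = some (comp', members') ∧
      JInv N (P', R') (comp', members') := by
  obtain ⟨P', R', root', d', hu, hA', hR', hM⟩ := union_ok hA hR hi hj
  unfold linkB
  rw [get_valid comp 0 hB.lenC hi, get_valid comp 0 hB.lenC hj]
  dsimp only
  have hav : ValidI N (PySem.List.pyGetD comp i 0) := hB.cv i hi
  have hbv : ValidI N (PySem.List.pyGetD comp j 0) := hB.cv j hj
  by_cases hab : PySem.List.pyGetD comp i 0 = PySem.List.pyGetD comp j 0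
  · rw [if_neg (not_not_intro hab)]
    refine ⟨P', R', comp, members, hu, rfl, root', d', hA', hR', hB, ?_⟩
    intro z w hz hw
    rw [hM z w hz hw]
    have hij : root i = root j := (hBr i j hi hj).2 hab
    constructor
    · intro h
      rcases h with h | ⟨h1, h2⟩
      · exact (hBr z w hz hw).1 h
      · refine (hBr z w hz hw).1 ?_
        rcases h1 with h1 | h1 <;> rcases h2 with h2 | h2 <;> simp [h1, h2, hij]
    · intro h
      exact Or.inl ((hBr z w hz hw).2 h)
  · rw [if_pos hab]
    rw [get_valid members [] hB.lenM hav, get_valid members [] hB.lenM hbv]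
    dsimp only
    by_cases hsw : (PySem.List.pyGetD members (PySem.List.pyGetD comp i 0) []).length
        < (PySem.List.pyGetD members (PySem.List.pyGetD comp j 0) []).length
    · rw [if_pos hsw]
      dsimp only
      -- winner label a' = comp[j], loser b' = comp[i]
      obtain ⟨comp', m2, hmatch, hB', hpt⟩ :=
        link_core (a' := nthD comp j) (b' := nthD comp i) hB hbv hav (fun h => hab h.symm)
      refine ⟨P', R', comp', m2, hu, hmatch, root', d', hA', hR', hB', ?_⟩
      intro z w hz hw
      rw [hM z w hz hw]
      have hz' := hpt z hz
      have hw' := hpt w hw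
      simp only [nthD] at hz' hw' ⊢
      rw [hz', hw', swap_iff (PySem.List.pyGetD comp j 0) (PySem.List.pyGetD comp i 0) _ _]
      have t1 : ∀ a, ValidI N a → ((root a = root i ∨ root a = root j) ↔
          (PySem.List.pyGetD comp a 0 = PySem.List.pyGetD comp j 0 ∨
            PySem.List.pyGetD comp a 0 = PySem.List.pyGetD comp i 0)) := by
        intro a ha
        have h1 := hBr a i ha hi
        have h2 := hBr a j ha hj
        simp only [nthD] at h1 h2
        tauto
      refine or_congr ?_ (and_congr (t1 z hz) (t1 w hw))
      have h := hBr z w hz hw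
      simp only [nthD] at h
      exact h
    · rw [if_neg hsw]
      dsimp only
      obtain ⟨comp', m2, hmatch, hB', hpt⟩ :=
        link_core (a' := nthD comp i) (b' := nthD comp j) hB hav hbv hab
      refine ⟨P', R', comp', m2, hu, hmatch, root', d', hA', hR', hB', ?_⟩
      intro z w hz hw
      rw [hM z w hz hw]
      have hz' := hpt z hz
      have hw' := hpt w hw
      simp only [nthD] at hz' hw' ⊢
      rw [hz', hw', swap_iff (PySem.List.pyGetD comp i 0) (PySem.List.pyGetD comp j 0) _ _]
      have t1 : ∀ a, ValidI N a → ((root a = root i ∨ root a = root j) ↔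
          (PySem.List.pyGetD comp a 0 = PySem.List.pyGetD comp i 0 ∨
            PySem.List.pyGetD comp a 0 = PySem.List.pyGetD comp j 0)) := by
        intro a ha
        have h1 := hBr a i ha hi
        have h2 := hBr a j ha hj
        simp only [nthD] at h1 h2
        tauto
      refine or_congr ?_ (and_congr (t1 z hz) (t1 w hw))
      have h := hBr z w hz hw
      simp only [nthD] at h
      exact h

lemma pyRangePos_nil {a b s : Int} (hs : 0 < s) (h : b ≤ a) : PySem.List.pyRange a b s = [] := by
  rw [PySem.List.pyRange_of_pos _ _ hs, if_neg (by omega)]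
  simp

lemma pyRangePos_cons {a b s : Int} (hs : 0 < s) (h : a < b) :
    PySem.List.pyRange a b s = a :: PySem.List.pyRange (a + s) b s := by
  rw [PySem.List.pyRange_of_pos _ _ hs, PySem.List.pyRange_of_pos _ _ hs]
  rw [if_pos h]
  have e1 : (b - a + s - 1) / s = (b - a - 1) / s + 1 := by
    rw [show b - a + s - 1 = (b - a - 1) + 1 * s by ring, Int.add_mul_ediv_right _ _ (by omega)]
  have hnn : 0 ≤ (b - a - 1) / s := Int.ediv_nonneg (by omega) (by omega)
  have e2 : ((b - a + s - 1) / s).toNat = ((b - a - 1) / s).toNat + 1 := by omega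
  have e3 : (if a + s < b then ((b - (a + s) + s - 1) / s).toNat else 0) = ((b - a - 1) / s).toNat := by
    by_cases hc : a + s < b
    · rw [if_pos hc]; congr 2; ring
    · rw [if_neg hc]
      have : (b - a - 1) / s = 0 := Int.ediv_eq_zero_of_lt (by omega) (by omega)
      omega
  rw [e2, e3, List.range_succ_eq_map]
  simp only [List.map_cons, List.map_map]
  congr 1
  · simp
  · apply List.map_congr_left
    intro k _
    simp only [Function.comp_apply]
    push_cast
    ring

-- the inner loops run in lockstep over the same multiples of i
lemma inner_ok {n : Int} {i : Int} (hi1 : 1 ≤ i) (hin : i ≤ n) :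
    ∀ (fuel : Nat) (m : Int), 2 ≤ m → (n + 1 - i * m).toNat < fuel →
      ∀ st cm, JInv (n + 1) st cm →
      ∃ st' cm', innerA n fuel i m st = some st' ∧
        (PySem.List.pyRange (i * m) (n + 1) i).foldl
          (fun os2 j => os2.bind (fun cm => linkB cm.1 cm.2 i j)) (some cm) = some cm' ∧
        JInv (n + 1) st' cm' := by
  intro fuel
  induction fuel with
  | zero => intro m _ hf _ _ _; omega
  | succ f ih =>
    intro m hm hf st cm hJ
    obtain ⟨P, R⟩ := st
    obtain ⟨comp, members⟩ := cm
    obtain ⟨root, d, hA, hR, hB, hBr⟩ := hJ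
    simp only [innerA]
    by_cases hc : i * m ≤ n
    · rw [if_pos hc]
      have hmul : 0 ≤ i * m := mul_nonneg (by omega) (by omega)
      have hiv : ValidI (n + 1) i := ⟨by omega, by omega⟩
      have hjv : ValidI (n + 1) (i * m) := ⟨hmul, by omega⟩
      obtain ⟨P', R', comp', members', hu, hlink, hJ'⟩ := step_ok hA hR hB hBr hiv hjv
      rw [hu]
      dsimp only
      have harith : (n + 1 - i * (m + 1)).toNat < f := by
        have e : i * (m + 1) = i * m + i := by ring
        omega
      obtain ⟨st', cm', hia, hfb, hJ''⟩ := ih (m + 1) (by omega) harith (P', R') (comp', members') hJ'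
      refine ⟨st', cm', hia, ?_, hJ''⟩
      rw [pyRangePos_cons (by omega) (by omega), List.foldl_cons]
      have hstep : (some (comp, members)).bind
          (fun cm => linkB cm.1 cm.2 i (i * m)) = some (comp', members') := hlink
      rw [hstep, show i * m + i = i * (m + 1) by ring]
      exact hfb
    · rw [if_neg hc]
      refine ⟨(P, R), (comp, members), rfl, ?_, ⟨root, d, hA, hR, hB, hBr⟩⟩
      rw [pyRangePos_nil (by omega) (by omega)]
      rfl

lemma outer_ok {n : Int} (L : List Int) (hL : ∀ i ∈ L, 1 ≤ i ∧ i ≤ n) :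
    ∀ st cm, JInv (n + 1) st cm →
      ∃ st' cm',
        L.foldl (fun ost i => ost.bind (fun st => innerA n ((n + 1).toNat + 1) i 2 st)) (some st) = some st' ∧
        L.foldl (fun os i => (PySem.List.pyRange (i + i) (n + 1) i).foldl
            (fun os2 j => os2.bind (fun cm => linkB cm.1 cm.2 i j)) os) (some cm) = some cm' ∧
        JInv (n + 1) st' cm' := by
  induction L with
  | nil => intro st cm hJ; exact ⟨st, cm, rfl, rfl, hJ⟩
  | cons i L' ih =>
    intro st cm hJ
    have hi := hL i List.mem_cons_self
    obtain ⟨st1, cm1, hia, hfb, hJ1⟩ := inner_ok hi.1 hi.2 ((n + 1).toNat + 1) 2 (by omega)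
      (by omega) st cm hJ
    simp only [List.foldl_cons]
    have h1 : (some st).bind (fun st => innerA n ((n + 1).toNat + 1) i 2 st) = some st1 := hia
    rw [h1, show i + i = i * 2 by ring, hfb]
    exact ih (fun a ha => hL a (List.mem_cons_of_mem i ha)) st1 cm1 hJ1

lemma queries_ok {n : Int} {R comp : List Int} {members : List (List Int)} (qs : List (List Int))
    (hq : ∀ q ∈ qs, q.length = 2 ∧ ∀ x ∈ q, -(n + 1) ≤ x ∧ x ≤ n) :
    ∀ (P : List Int) (root : Int → Int) (d : Int → Nat),
      InvA (n + 1) P root d → InvB (n + 1) comp members → BridgeAB (n + 1) root comp →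
      ∃ bs, queryLoopA (P, R) qs = some bs ∧ queriesB comp qs = some bs := by
  induction qs with
  | nil => intro P root d _ _ _; exact ⟨[], rfl, rfl⟩
  | cons q rest ih =>
    intro P root d hA hB hBr
    have hq0 := hq q List.mem_cons_self
    obtain ⟨u, v, rfl⟩ : ∃ u v, q = [u, v] := by
      rcases q with _ | ⟨u, q1⟩
      · exact absurd hq0.1 (by simp)
      rcases q1 with _ | ⟨v, q2⟩
      · exact absurd hq0.1 (by simp)
      rcases q2 with _ | ⟨w, q3⟩
      · exact ⟨u, v, rfl⟩
      · exact absurd hq0.1 (by simp)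
    have hu := hq0.2 u (by simp)
    have hv := hq0.2 v (by simp)
    obtain ⟨P1, hf1, hA1⟩ := find_full hA hu.1 (by omega)
    obtain ⟨P2, hf2, hA2⟩ := find_full hA1 hv.1 (by omega)
    simp only [queryLoopA, queriesB]
    rw [hf1]
    dsimp only
    rw [hf2]
    dsimp only
    obtain ⟨bs, hra, hrb⟩ := ih (fun q' hq' => hq q' (List.mem_cons_of_mem _ hq')) P2 root d hA2 hB hBr
    rw [hra]
    dsimp only
    rw [get_ix comp 0 hB.lenC hu.1 (by omega), get_ix comp 0 hB.lenC hv.1 (by omega)]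
    dsimp only
    rw [hrb]
    simp only [Option.map_some]
    have hb : (root (ixN (n + 1) u) == root (ixN (n + 1) v))
        = (PySem.List.pyGetD comp (ixN (n + 1) u) 0 == PySem.List.pyGetD comp (ixN (n + 1) v) 0) := by
      rw [Bool.eq_iff_iff]
      simp only [beq_iff_eq]
      have hbr := hBr (ixN (n + 1) u) (ixN (n + 1) v)
        (ix_valid hu.1 (by omega)) (ix_valid hv.1 (by omega))
      simp only [nthD] at hbr
      exact hbr
    rw [hb]
    exact ⟨_, rfl, rfl⟩

lemma init_ok (n : Int) :
    JInv (n + 1) (PySem.List.pyRange 0 (n + 1) 1, (PySem.List.pyRange 0 (n + 1) 1).map (fun _ => (1 : Int)))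
      (PySem.List.pyRange 0 (n + 1) 1, (PySem.List.pyRange 0 (n + 1) 1).map (fun i => [i])) := by
  have hlen : (PySem.List.pyRange 0 (n + 1) 1).length = (n + 1).toNat := by
    rw [PySem.List.length_pyRange_one]
    congr 1
    omega
  have hnth : ∀ x, ValidI (n + 1) x → nthD (PySem.List.pyRange 0 (n + 1) 1) x = x := by
    intro x hx
    have hx1 := hx.1
    have hx2 := hx.2
    unfold nthD
    rw [PySem.List.pyGetD_eq_getElem _ _ hx.1 (by rw [hlen]; omega)]
    rw [PySem.List.getElem_pyRange_one]
    omega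
  have hmth : ∀ c, ValidI (n + 1) c →
      mthD ((PySem.List.pyRange 0 (n + 1) 1).map (fun i => [i])) c = [c] := by
    intro c hc
    have hc1 := hc.1
    have hc2 := hc.2
    unfold mthD
    rw [PySem.List.pyGetD_eq_getElem _ _ hc.1 (by rw [List.length_map, hlen]; omega)]
    rw [List.getElem_map, PySem.List.getElem_pyRange_one]
    congr 1
    omega
  refine ⟨fun z => z, fun _ => 0, ?_, ?_, ?_, ?_⟩
  · refine ⟨hlen, ?_, ?_, ?_, ?_, ?_, ?_, ?_, ?_⟩
    · intro x hx; rw [hnth x hx]; exact hx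
    · intro x hx; exact hx
    · intro x hx; exact hnth x hx
    · intro x hx; rw [hnth x hx]
    · intro x hx h; rfl
    · intro x hx h; exact absurd (hnth x hx) h
    · intro x hx h; exact absurd rfl h
    · intro x hx
      exact classCard_pos (fun z => z) hx rfl
  · rw [List.length_map]; exact hlen
  · refine ⟨hlen, by rw [List.length_map]; exact hlen, ?_, ?_⟩
    · intro x hx; rw [hnth x hx]; exact hx
    · intro c hc x
      rw [hmth c hc]
      constructor
      · intro hx
        have : x = c := by simpa using hx
        subst this
        exact ⟨hc, hnth x hc⟩
      · intro ⟨hxv, hcx⟩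
        rw [hnth x hxv] at hcx
        simp [hcx]
  · intro x y hx hy
    dsimp only
    rw [hnth x hx, hnth y hy]

-- ===== VERDICT (by name: the statement is the Claim_ definition above) =====
theorem areConnected_spec : Claim_equal_areConnected := by
  intro n t queries _hdom hpre
  obtain ⟨ht, hq⟩ := hpre
  unfold Spec_areConnected areConnected areConnected_alt
  have hL : ∀ i ∈ PySem.List.pyRange (t + 1) (n + 1) 1, 1 ≤ i ∧ i ≤ n := by
    intro i hi
    rcases ht with ht | ht
    · rw [PySem.List.mem_pyRange_one] at hi; omega
    · rw [PySem.List.pyRange_one_eq_nil (by omega)] at hi; simp at hi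
  obtain ⟨st', cm', hfa, hfb, hJ'⟩ := outer_ok _ hL _ _ (init_ok n)
  rw [hfa, hfb]
  obtain ⟨root, d, hA, hR, hB, hBr⟩ := hJ'
  obtain ⟨bs, hqa, hqb⟩ := queries_ok (R := st'.2) (members := cm'.2) queries hq st'.1 root d hA hB hBr
  have hqa' : queryLoopA st' queries = some bs := hqa
  show (queryLoopA st' queries).getD [] = (queriesB cm'.1 queries).getD []
  rw [hqa', hqb]
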